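-- pv_equiv track=rewrite | github.com/JTibs18/LeetCode | UniqueMorseCodeWords.py | uniqueMorseRepresentationsV1
-- ===== SOURCE A (Python) =====
-- def uniqueMorseRepresentationsV1(words):
--     encodings = {
--         "a":".-",
--         "b":"-...",
--         "c": "-.-.",
--         "d": "-..",
--         "e": ".",
--         "f": "..-.",
--         "g": "--.",
--         "h": "....",
--         "i": "..",
--         "j": ".---",
--         "k": "-.-",
--         "l": ".-..",
--         "m": "--",
--         "n": "-.",
--         "o": "---",
--         "p": ".--.",
--         "q": "--.-",
--         "r": ".-.",
--         "s": "...",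
--         "t": "-",
--         "u": "..-",
--         "v": "...-",
--         "w": ".--",
--         "x": "-..-",
--         "y": "-.--",
--         "z": "--.."
--     }
--
--     uniqueWordCount = set()
--     encoded = ''
--
--     for i in words:
--         for j in i:
--             encoded += encodings[j]
--
--         uniqueWordCount.add(encoded)
--         encoded = ''
--
--     return len(uniqueWordCount)
-- ===== SOURCE B (Python) =====
-- def uniqueMorseRepresentationsV1(words):
--     MORSE = [".-", "-...", "-.-.", "-..", ".", "..-.", "--.", "....",
--              "..", ".---", "-.-", ".-..", "--", "-.", "---", ".--.",
--              "--.-", ".-.", "...", "-", "..-", "...-", ".--", "-..-",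
--              "-.--", "--.."]
--     encoded = sorted(''.join(MORSE[ord(c) - 97] for c in w) for w in words)
--     count = 0
--     prev = None
--     for e in encoded:
--         if e != prev:
--             count += 1
--             prev = e
--     return count
-- ===== Notes on version B (the rewrite author's own statement) =====
-- stated objective: alternative
-- what changed: Replaces A's char-keyed dict plus hash-set deduplication with an ord(c)-97-indexed code table, then sort the encoded strings and count distinct values by a single adjacent-change scan.
import Mathlib
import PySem

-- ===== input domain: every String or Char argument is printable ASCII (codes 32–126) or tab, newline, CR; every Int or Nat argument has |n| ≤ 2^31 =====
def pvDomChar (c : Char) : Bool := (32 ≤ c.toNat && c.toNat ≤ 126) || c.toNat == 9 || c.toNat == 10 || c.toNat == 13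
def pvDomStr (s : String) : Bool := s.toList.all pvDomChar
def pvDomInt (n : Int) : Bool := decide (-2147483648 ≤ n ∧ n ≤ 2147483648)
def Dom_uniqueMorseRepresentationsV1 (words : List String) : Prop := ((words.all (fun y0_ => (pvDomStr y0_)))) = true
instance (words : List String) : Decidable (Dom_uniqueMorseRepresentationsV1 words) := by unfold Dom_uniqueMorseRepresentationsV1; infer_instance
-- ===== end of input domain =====

-- B replaces A's char-keyed dict + hash-set dedup by an ord(c)-97-indexed code table, sort of the encoded strings, and an adjacent-change scan (same result, different pass shape).

-- ===== PORT A =====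
-- A's dict literal; values as char lists (A builds 'encoded' by string concatenation).
def morseEncodings : PySem.Dict Char (List Char) := PySem.Dict.ofList
  [('a', ['.','-']), ('b', ['-','.','.','.']), ('c', ['-','.','-','.']), ('d', ['-','.','.']),
   ('e', ['.']), ('f', ['.','.','-','.']), ('g', ['-','-','.']), ('h', ['.','.','.','.']),
   ('i', ['.','.']), ('j', ['.','-','-','-']), ('k', ['-','.','-']), ('l', ['.','-','.','.']),
   ('m', ['-','-']), ('n', ['-','.']), ('o', ['-','-','-']), ('p', ['.','-','-','.']),
   ('q', ['-','-','.','-']), ('r', ['.','-','.']), ('s', ['.','.','.']), ('t', ['-']),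
   ('u', ['.','.','-']), ('v', ['.','.','.','-']), ('w', ['.','-','-']), ('x', ['-','.','.','-']),
   ('y', ['-','.','-','-']), ('z', ['-','-','.','.'])]

-- 'encodings[j]' is KeyError for a char outside a–z: Pre_ excludes those inputs, so the getD default is never read.
def uniqueMorseRepresentationsV1 (words : List String) : Int :=
  let uniqueWordCount : PySem.Set (List Char) :=
    words.foldl (fun s w =>
      PySem.Set.add s (w.toList.foldl (fun encoded c => encoded ++ morseEncodings.getD c []) []))
      PySem.Set.empty
  (uniqueWordCount.length : Int)

-- ===== PORT B =====
-- B's positional table of code strings (MORSE[ord(c) - 97]).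
def bMorse : List String :=
  [".-", "-...", "-.-.", "-..", ".", "..-.", "--.", "....",
   "..", ".---", "-.-", ".-..", "--", "-.", "---", ".--.",
   "--.-", ".-.", "...", "-", "..-", "...-", ".--", "-..-",
   "-.--", "--.."]

-- MORSE[ord(c)-97] via pyGet? (Python negative-index rule); IndexError (= none) cannot occur inside Pre_, so the getD default is never read there.
def uniqueMorseRepresentationsV1_alt (words : List String) : Int :=
  let encoded : List String :=
    PySem.List.sorted
      (words.map (fun w =>
        PySem.Str.join "" (w.toList.map (fun c => (PySem.List.pyGet? bMorse ((c.toNat : Int) - 97)).getD ""))))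
      (fun x => x) false
  (encoded.foldl
    (fun (st : Int × Option String) e => if some e ≠ st.2 then (st.1 + 1, some e) else st)
    ((0 : Int), (none : Option String))).1

-- ===== PRECONDITION & SPEC =====
-- Pre_ excludes exactly the inputs where A raises KeyError: a word with a char outside 'a'..'z'.
def Pre_uniqueMorseRepresentationsV1 (words : List String) : Prop :=
  (words.all (fun w => w.toList.all (fun c => 'a' ≤ c && c ≤ 'z'))) = true
instance (words : List String) : Decidable (Pre_uniqueMorseRepresentationsV1 words) := by unfold Pre_uniqueMorseRepresentationsV1; infer_instance

def pvWitness_uniqueMorseRepresentationsV1 : List String := ["gin", "zen", "gig", "msg"]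

def Spec_uniqueMorseRepresentationsV1 (words : List String) (out : Int) : Prop := out = uniqueMorseRepresentationsV1_alt words
instance (words : List String) (out : Int) : Decidable (Spec_uniqueMorseRepresentationsV1 words out) := by unfold Spec_uniqueMorseRepresentationsV1; infer_instance

-- ===== CLAIM (what is proved, stated in full; the proofs are below) =====
def Claim_equal_uniqueMorseRepresentationsV1 : Prop := ∀ (words : List String), Dom_uniqueMorseRepresentationsV1 words → Pre_uniqueMorseRepresentationsV1 words → Spec_uniqueMorseRepresentationsV1 words (uniqueMorseRepresentationsV1 words)

-- ===== LEMMAS AND PROOFS =====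

-- A's per-word encoding, as flatten ∘ map over the dict.
def pvEncA (w : String) : List Char := (w.toList.map (fun c => morseEncodings.getD c [])).flatten

-- B's per-word encoding (the join argument of B's port).
def pvEncB (w : String) : String :=
  PySem.Str.join "" (w.toList.map (fun c => (PySem.List.pyGet? bMorse ((c.toNat : Int) - 97)).getD ""))

theorem pvEncA_foldl (w : String) :
    w.toList.foldl (fun encoded c => encoded ++ morseEncodings.getD c []) [] = pvEncA w := by
  rw [PySem.List.foldl_append_eq_flatMap]
  simp [pvEncA, List.flatMap_def]

-- A's result is the number of distinct values of pvEncA over words.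
theorem pvA_eq_card (words : List String) :
    uniqueMorseRepresentationsV1 words = (((words.map pvEncA).toFinset.card : Nat) : Int) := by
  unfold uniqueMorseRepresentationsV1
  have h1 : words.foldl (fun s w =>
      PySem.Set.add s (w.toList.foldl (fun encoded c => encoded ++ morseEncodings.getD c []) []))
      PySem.Set.empty = PySem.Set.ofList (words.map pvEncA) := by
    rw [PySem.Set.ofList_eq_foldl, List.foldl_map]
    apply PySem.List.foldl_congr_mem
    intro acc w _
    rw [pvEncA_foldl]
  rw [h1]
  have h2 : (PySem.Set.ofList (words.map pvEncA)).length = (words.map pvEncA).toFinset.card := by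
    rw [← List.toFinset_card_of_nodup (PySem.Set.nodup_ofList (words.map pvEncA))]
    congr 1
    ext x
    simp [PySem.Set.mem_ofList]
  simp [h2]

theorem pvJoin_empty_sep (parts : List (List Char)) : PySem.Chars.join [] parts = parts.flatten := by
  induction parts with
  | nil => rfl
  | cons h t ih =>
    cases t with
    | nil => simp [PySem.Chars.join, List.intercalate]
    | cons y s => simp [PySem.Chars.join_cons_cons] at *; simpa using ih

-- on a lowercase char the two lookups agree (B's string code spells A's char-list code)
theorem pvLookup_bridge (c : Char) (h1 : 'a' ≤ c) (h2 : c ≤ 'z') :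
    ((PySem.List.pyGet? bMorse ((c.toNat : Int) - 97)).getD "").toList = morseEncodings.getD c [] := by
  have hlo : 97 ≤ c.toNat := h1
  have hhi : c.toNat ≤ 122 := h2
  have hc : c = Char.ofNat c.toNat := by
    rcases c with ⟨v, hv⟩
    simp [Char.ofNat, Char.toNat, hv]
    exact Char.ext rfl
  rw [hc]
  generalize c.toNat = n at hlo hhi
  interval_cases n <;> decide

-- under Pre_ each per-word B encoding is the string of A's encoding
theorem pvEncB_eq (w : String) (hw : (w.toList.all (fun c => 'a' ≤ c && c ≤ 'z')) = true) :
    (pvEncB w).toList = pvEncA w := by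
  unfold pvEncB pvEncA
  rw [PySem.Str.toList_join]
  simp only [List.map_map]
  rw [show (String.toList ∘ fun c => (PySem.List.pyGet? bMorse ((c.toNat : Int) - 97)).getD "")
        = fun c : Char => ((PySem.List.pyGet? bMorse ((c.toNat : Int) - 97)).getD "").toList from rfl]
  have : "".toList = ([] : List Char) := rfl
  rw [this, pvJoin_empty_sep]
  congr 1
  apply List.map_congr_left
  intro c hcmem
  have hcw := List.all_eq_true.mp hw c hcmem
  simp only [Bool.and_eq_true, decide_eq_true_eq] at hcw
  exact pvLookup_bridge c hcw.1 hcw.2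

-- the adjacent-change scan on an ≤-sorted list counts the distinct values
theorem pvScan_count (l : List String) (p : String) (c : Int)
    (h : (p :: l).Pairwise (· ≤ ·)) :
    (l.foldl (fun (st : Int × Option String) e => if some e ≠ st.2 then (st.1 + 1, some e) else st)
      (c, some p)).1 = c + (((p :: l).toFinset.card : Nat) : Int) - 1 := by
  induction l generalizing p c with
  | nil => simp
  | cons y t ih =>
    have hpy : p ≤ y := (List.pairwise_cons.mp h).1 y (by simp)
    have hrest : (y :: t).Pairwise (· ≤ ·) := (List.pairwise_cons.mp h).2
    by_cases hyp : y = p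
    · subst hyp
      rw [List.foldl_cons, if_neg (by simp)]
      rw [ih y c hrest]
      have hfs : (y :: y :: t).toFinset = (y :: t).toFinset := by
        simp [List.toFinset_cons]
      rw [hfs]
    · have hnp : p ∉ (y :: t).toFinset := by
        simp only [List.mem_toFinset, List.mem_cons]
        rintro (rfl | hpt)
        · exact hyp rfl
        · have hyx : y ≤ p := (List.pairwise_cons.mp hrest).1 p hpt
          exact hyp (le_antisymm hyx hpy)
      have hcard : (p :: y :: t).toFinset.card = (y :: t).toFinset.card + 1 := by
        rw [List.toFinset_cons]
        rw [Finset.card_insert_of_notMem (by simpa [List.toFinset_cons] using hnp)]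
      rw [List.foldl_cons, if_pos (by simp [hyp])]
      rw [ih y (c + 1) hrest, hcard]
      push_cast
      ring

-- B's result is the number of distinct values of pvEncB over words.
theorem pvB_eq_card (words : List String) :
    uniqueMorseRepresentationsV1_alt words = (((words.map pvEncB).toFinset.card : Nat) : Int) := by
  unfold uniqueMorseRepresentationsV1_alt
  dsimp only
  rw [show words.map (fun w =>
        PySem.Str.join "" (w.toList.map (fun c => (PySem.List.pyGet? bMorse ((c.toNat : Int) - 97)).getD "")))
      = words.map pvEncB from rfl]
  generalize words.map pvEncB = E
  have hperm : (PySem.List.sorted E (fun x => x) false).Perm E :=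
    PySem.List.sorted_perm E (fun x => x) false
  have hpw : (PySem.List.sorted E (fun x => x) false).Pairwise (· ≤ ·) :=
    PySem.List.sorted_pairwise E (fun x : String => x)
  cases hSc : PySem.List.sorted E (fun x => x) false with
  | nil =>
    have hEnil : E = [] := by
      have := hperm
      rw [hSc] at this
      exact (List.Perm.nil_eq this).symm
    rw [hEnil]
    simp
  | cons p t =>
    rw [List.foldl_cons, if_pos (by simp)]
    rw [pvScan_count t p (0 + 1) (hSc ▸ hpw)]
    have hfin : (p :: t).toFinset = E.toFinset := by
      ext x
      have := hperm.mem_iff (a := x)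
      rw [hSc] at this
      simpa using this
    rw [hfin]
    omega

-- under Pre_ the two distinct counts coincide (String.toList is injective)
theorem pvCard_eq (words : List String) (hpre : Pre_uniqueMorseRepresentationsV1 words) :
    (words.map pvEncB).toFinset.card = (words.map pvEncA).toFinset.card := by
  have hmap : (words.map pvEncB).map String.toList = words.map pvEncA := by
    rw [List.map_map]
    apply List.map_congr_left
    intro w hw
    exact pvEncB_eq w (List.all_eq_true.mp hpre w hw)
  rw [← hmap,
    show ((words.map pvEncB).map String.toList).toFinset
        = (words.map pvEncB).toFinset.image String.toList from by ext x; simp,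
    Finset.card_image_of_injective _ (fun a b h => by
      have h2 := congrArg String.ofList h
      simpa using h2)]

-- ===== VERDICT (by name: the statement is the Claim_ definition above) =====
theorem uniqueMorseRepresentationsV1_spec : Claim_equal_uniqueMorseRepresentationsV1 := by
  intro words _ hpre
  unfold Spec_uniqueMorseRepresentationsV1
  rw [pvA_eq_card, pvB_eq_card, pvCard_eq words hpre]
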